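-- pv_equiv track=rewrite | github.com/pradyuns/shadow | backend/workers/scraper/noise_filter.py | _remove_empty_hunks
-- ===== SOURCE A (Python) =====
-- def _remove_empty_hunks(lines: list[str]) -> list[str]:
--     """Remove hunk headers that have no actual changes beneath them."""
--     result = []
--     i = 0
--     while i < len(lines):
--         if lines[i].startswith("@@"):
--             # Peek ahead to see if this hunk has any changes
--             hunk_lines = [lines[i]]
--             j = i + 1
--             has_changes = False
--             while j < len(lines) and not lines[j].startswith("@@"):
--                 hunk_lines.append(lines[j])
--                 if lines[j].startswith("+") or lines[j].startswith("-"):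
--                     if not lines[j].startswith("---") and not lines[j].startswith("+++"):
--                         has_changes = True
--                 j += 1
--
--             if has_changes:
--                 result.extend(hunk_lines)
--             i = j
--         else:
--             result.append(lines[i])
--             i += 1
--
--     return result
-- ===== SOURCE B (Python) =====
-- def _remove_empty_hunks(lines: list[str]) -> list[str]:
--     """Remove hunk headers that have no actual changes beneath them.
--
--     Backward traversal building the output back-to-front: scanning in reverse,
--     the change lines of a hunk are seen BEFORE its '@@' header, so each hunk's
--     fate is decided the instant its header is reached -- no peek-ahead, no
--     deferred flush.  `buf` holds (reversed) lines below the current position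
--     that have not yet met their header; at the end it is the pass-through
--     preamble.  The accumulated reversed result is reversed once at the end.
--     """
--     rev = []
--     buf = []
--     has_changes = False
--     for line in reversed(lines):
--         if line.startswith("@@"):
--             if has_changes:
--                 rev += buf
--                 rev.append(line)
--             buf = []
--             has_changes = False
--         else:
--             buf.append(line)
--             if line.startswith(("+", "-")) and not line.startswith(("---", "+++")):
--                 has_changes = True
--     rev += buf
--     rev.reverse()
--     return rev
-- ===== Notes on version B (the rewrite author's own statement) =====
-- stated objective: alternative
-- what changed: Replaces A's forward nested peek-ahead scan (inner while + i=j jump) by a backward traversal that builds the output back-to-front: scanning in reverse, a hunk's change lines are seen before its '@@' header, so each hunk is kept or dropped the moment its header is reached, with one final reverse of the accumulated result.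
import Mathlib
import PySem

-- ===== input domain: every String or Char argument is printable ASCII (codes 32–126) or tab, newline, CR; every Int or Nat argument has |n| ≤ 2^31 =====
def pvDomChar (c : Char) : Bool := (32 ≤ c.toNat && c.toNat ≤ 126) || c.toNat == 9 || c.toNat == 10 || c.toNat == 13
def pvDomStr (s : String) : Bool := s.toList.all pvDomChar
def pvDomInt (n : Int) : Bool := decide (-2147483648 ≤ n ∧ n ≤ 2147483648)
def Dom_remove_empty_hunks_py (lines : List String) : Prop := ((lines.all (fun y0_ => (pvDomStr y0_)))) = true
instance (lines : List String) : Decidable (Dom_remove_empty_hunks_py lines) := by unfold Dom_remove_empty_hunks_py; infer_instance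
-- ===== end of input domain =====

-- B replaces A's forward nested peek-ahead scan by a backward traversal built
-- back-to-front: in reverse order a hunk's change lines precede its header, so
-- each hunk is decided the moment its '@@' line is reached; same O(n) cost.

def pvIsHdr (s : String) : Bool := PySem.Str.startswith s "@@"

def pvIsChange (s : String) : Bool :=
  (PySem.Str.startswith s "+" || PySem.Str.startswith s "-")
    && !(PySem.Str.startswith s "---") && !(PySem.Str.startswith s "+++")

-- ===== PORT A =====
-- inner `while j < len(lines) and not lines[j].startswith("@@")` loop of A:
-- returns (hunk lines after the header, has_changes, remaining lines from j on)
def scanHunk : List String → List String × Bool × List String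
  | [] => ([], false, [])
  | l :: rest =>
    if pvIsHdr l then ([], false, l :: rest)
    else
      let r := scanHunk rest
      (l :: r.1, pvIsChange l || r.2.1, r.2.2)

theorem scanHunk_len : ∀ rest : List String, (scanHunk rest).2.2.length ≤ rest.length
  | [] => by simp [scanHunk]
  | l :: rest => by
    simp only [scanHunk]
    split
    · simp
    · exact (scanHunk_len rest).trans (Nat.le_succ _)

def remove_empty_hunks_py (lines : List String) : List String :=
  match lines with
  | [] => []
  | l :: rest =>
    if pvIsHdr l then
      let s := scanHunk rest
      (if s.2.1 then l :: s.1 else []) ++ remove_empty_hunks_py s.2.2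
    else
      l :: remove_empty_hunks_py rest
termination_by lines.length
decreasing_by
  · exact Nat.lt_succ_of_le (scanHunk_len rest)
  · simp

-- ===== PORT B =====
-- one step of Source B's `for line in reversed(lines)` loop over (rev, buf, has_changes)
def bStep (st : List String × List String × Bool) (line : String) :
    List String × List String × Bool :=
  if pvIsHdr line then
    if st.2.2 then (st.1 ++ st.2.1 ++ [line], [], false)
    else (st.1, [], false)
  else
    (st.1, st.2.1 ++ [line], st.2.2 || pvIsChange line)

def remove_empty_hunks_py_alt (lines : List String) : List String :=
  let st := lines.reverse.foldl bStep ([], [], false)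
  (st.1 ++ st.2.1).reverse

-- ===== PRECONDITION & SPEC =====
def Spec_remove_empty_hunks_py (lines : List String) (out : List String) : Prop := out = remove_empty_hunks_py_alt lines
instance (lines : List String) (out : List String) : Decidable (Spec_remove_empty_hunks_py lines out) := by unfold Spec_remove_empty_hunks_py; infer_instance

-- ===== CLAIM (what is proved, stated in full; the proofs are below) =====
def Claim_equal_remove_empty_hunks_py : Prop := ∀ (lines : List String), Dom_remove_empty_hunks_py lines → Spec_remove_empty_hunks_py lines (remove_empty_hunks_py lines)

-- ===== LEMMAS AND PROOFS =====

-- A's inner scan is takeWhile/any/dropWhile on "not a header"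
theorem scanHunk_eq : ∀ rest : List String,
    scanHunk rest = (rest.takeWhile (fun s => !pvIsHdr s),
                     (rest.takeWhile (fun s => !pvIsHdr s)).any pvIsChange,
                     rest.dropWhile (fun s => !pvIsHdr s))
  | [] => by simp [scanHunk]
  | l :: rest => by
    by_cases hl : pvIsHdr l = true
    · simp [scanHunk, hl]
    · simp only [scanHunk, hl, Bool.false_eq_true, if_false]
      rw [scanHunk_eq rest]
      simp [hl]

-- A passes non-header prefix lines straight through
theorem A_passthrough : ∀ lines : List String,
    remove_empty_hunks_py lines =
      lines.takeWhile (fun s => !pvIsHdr s)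
        ++ remove_empty_hunks_py (lines.dropWhile (fun s => !pvIsHdr s))
  | [] => by simp [remove_empty_hunks_py]
  | l :: rest => by
    by_cases hl : pvIsHdr l = true
    · simp [hl]
    · rw [remove_empty_hunks_py]
      simp only [hl, Bool.false_eq_true, if_false]
      rw [A_passthrough rest]
      simp [hl]

-- A on a list starting with a header: decided by the following takeWhile block
theorem A_hdr (l : String) (rest : List String) (hl : pvIsHdr l = true) :
    remove_empty_hunks_py (l :: rest) =
      (if (rest.takeWhile (fun s => !pvIsHdr s)).any pvIsChange then
          l :: rest.takeWhile (fun s => !pvIsHdr s) else [])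
        ++ remove_empty_hunks_py (rest.dropWhile (fun s => !pvIsHdr s)) := by
  rw [remove_empty_hunks_py]
  simp only [hl, if_true, scanHunk_eq]

-- characterisation of B's fold state after consuming `lines` (in reverse order):
-- rev = reverse of A on the part from the first header on, buf = reversed
-- non-header prefix, flag = whether that prefix contains a change line
theorem foldr_char : ∀ lines : List String,
    lines.foldr (fun x y => bStep y x) ([], [], false) =
      ((remove_empty_hunks_py (lines.dropWhile (fun s => !pvIsHdr s))).reverse,
       (lines.takeWhile (fun s => !pvIsHdr s)).reverse,
       (lines.takeWhile (fun s => !pvIsHdr s)).any pvIsChange)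
  | [] => by simp [remove_empty_hunks_py]
  | l :: rest => by
    rw [List.foldr_cons, foldr_char rest]
    by_cases hl : pvIsHdr l = true
    · simp only [List.takeWhile_cons, List.dropWhile_cons, hl, Bool.not_true,
        Bool.false_eq_true, if_false, if_true, bStep]
      rw [A_hdr l rest hl]
      cases hc : (rest.takeWhile (fun s => !pvIsHdr s)).any pvIsChange <;> simp
    · simp only [List.takeWhile_cons, List.dropWhile_cons, hl, Bool.not_false,
        Bool.false_eq_true, if_false, if_true, bStep]
      simp [Bool.or_comm]

-- ===== VERDICT (by name: the statement is the Claim_ definition above) =====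
theorem remove_empty_hunks_py_spec : Claim_equal_remove_empty_hunks_py := by
  intro lines _
  unfold Spec_remove_empty_hunks_py remove_empty_hunks_py_alt
  rw [List.foldl_reverse, foldr_char lines]
  simp [A_passthrough lines]
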